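-- pv_equiv track=rewrite | github.com/fdebrus/Nikobus-HA | custom_components/nikobus/discovery/protocol.py | convert_nikobus_address
-- ===== SOURCE A (Python) =====
-- def convert_nikobus_address(address_string):
--     """Convert a hex address string to a Nikobus address."""
--     try:
--         address = int(address_string, 16)
--         nikobus_address = 0
--         for i in range(21):
--             nikobus_address = (nikobus_address << 1) | ((address >> i) & 1)
--         nikobus_address <<= 1
--         button = (address >> 21) & 0x07
--         final_address = nikobus_address + button
--         return f"{final_address:06X}"
--     except ValueError:
--         return f"[{address_string}]"
-- ===== SOURCE B (Python) =====
-- REV7 = [int(format(i, 'b').zfill(7)[::-1], 2) for i in range(128)]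
--
--
-- def convert_nikobus_address(address_string):
--     """Convert a hex address string to a Nikobus address."""
--     try:
--         address = int(address_string, 16)
--     except ValueError:
--         return f"[{address_string}]"
--     low = address & 0x1FFFFF
--     rev = (REV7[low & 0x7F] << 14) + (REV7[(low >> 7) & 0x7F] << 7) + REV7[low >> 14]
--     return f"{(rev << 1) + ((address >> 21) & 7):06X}"
-- ===== Notes on version B (the rewrite author's own statement) =====
-- stated objective: alternative
-- what changed: B replaces A's 21-iteration shift-and-OR bit loop by a precomputed 128-entry lookup table of 7-bit reversals (built once from reversed fixed-width binary strings) and assembles the reversed 21-bit field from the three 7-bit chunks of the masked address with two shifts and two additions.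
import Mathlib
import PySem

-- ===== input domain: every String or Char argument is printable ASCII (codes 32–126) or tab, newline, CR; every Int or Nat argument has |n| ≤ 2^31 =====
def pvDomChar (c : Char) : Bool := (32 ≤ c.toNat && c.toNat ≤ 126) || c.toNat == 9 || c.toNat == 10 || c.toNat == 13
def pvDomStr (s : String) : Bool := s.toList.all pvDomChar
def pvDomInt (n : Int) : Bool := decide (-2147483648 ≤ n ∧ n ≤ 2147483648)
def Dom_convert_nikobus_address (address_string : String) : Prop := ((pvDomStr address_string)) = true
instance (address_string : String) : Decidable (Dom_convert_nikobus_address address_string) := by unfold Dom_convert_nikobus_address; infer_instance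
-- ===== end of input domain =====

-- B replaces A's 21-step shift-and-OR accumulator loop by a chunked lookup-table bit
-- reversal: a 128-entry table of 7-bit reversals, combined over the three 7-bit chunks
-- of the masked 21-bit address (alternative algorithm, same cost class).

-- shared helper: hand port of f"{n:06X}" (hex digits of |n| uppercase, sign in front, zero-padded
-- to width 6); exact for every Int (both programs contain the identical f-string)
def fmt06X (n : Int) : String :=
  let digits := (Nat.toDigits 16 n.natAbs).map Char.toUpper
  String.ofList (PySem.Chars.zfill (if n < 0 then '-' :: digits else digits) 6)

-- ===== PORT A =====
def convert_nikobus_address (address_string : String) : String :=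
  match PySem.Int.ofStrBase? address_string 16 with
  | some address =>
    let nikobus_address : Int :=
      (PySem.List.pyRange 0 21 1).foldl
        (fun acc i => PySem.Int.bor (acc <<< (1 : Nat)) (PySem.Int.band (address >>> i.toNat) 1)) 0
    let nikobus_address := nikobus_address <<< (1 : Nat)
    let button := PySem.Int.band (address >>> (21 : Nat)) 7
    let final_address := nikobus_address + button
    fmt06X final_address
  | none => "[" ++ address_string ++ "]"

-- ===== PORT B =====
-- REV7 = [int(format(i, 'b').zfill(7)[::-1], 2) for i in range(128)]
-- ([::-1] is ported as List.reverse; the int(·, 2) cannot raise here — the string consists of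
-- binary digits — so the port's Option is discharged with .getD 0)
def REV7 : List Int :=
  (List.range 128).map (fun i =>
    (PySem.Int.ofCharsBase? ((PySem.Chars.zfill (PySem.Int.toBinChars (i : Int)) 7).reverse) 2).getD 0)

-- list indexing REV7[j]: the three indices are provably in [0, 128), so pyGet? is discharged with .getD 0
def convert_nikobus_address_alt (address_string : String) : String :=
  match PySem.Int.ofStrBase? address_string 16 with
  | none => "[" ++ address_string ++ "]"
  | some address =>
    let low := PySem.Int.band address 2097151
    let rev : Int :=
      ((PySem.List.pyGet? REV7 (PySem.Int.band low 127)).getD 0 <<< (14 : Nat))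
        + ((PySem.List.pyGet? REV7 (PySem.Int.band (low >>> (7 : Nat)) 127)).getD 0 <<< (7 : Nat))
        + (PySem.List.pyGet? REV7 (low >>> (14 : Nat))).getD 0
    fmt06X ((rev <<< (1 : Nat)) + PySem.Int.band (address >>> (21 : Nat)) 7)

-- ===== PRECONDITION & SPEC =====
def Spec_convert_nikobus_address (address_string : String) (out : String) : Prop := out = convert_nikobus_address_alt address_string
instance (address_string : String) (out : String) : Decidable (Spec_convert_nikobus_address address_string out) := by unfold Spec_convert_nikobus_address; infer_instance

-- ===== CLAIM (what is proved, stated in full; the proofs are below) =====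
def Claim_equal_convert_nikobus_address : Prop := ∀ (address_string : String), Dom_convert_nikobus_address address_string → Spec_convert_nikobus_address address_string (convert_nikobus_address address_string)

-- ===== LEMMAS AND PROOFS =====

-- bit i of a (0 or 1), as floor-division and Python-style modulus on Int
def pvBit (a : Int) (i : Nat) : Int := (a / 2 ^ i) % 2

-- the mirrored 7-bit sum every table entry equals
def pvRevSum7 (x : Int) : Int :=
  ((List.range 7).map (fun i => pvBit x i * 2 ^ (6 - i))).sum

-- ---- A-side loop characterisation ----

theorem pv_bit01 (a : Int) (i : Nat) :
    PySem.Int.band (a >>> i) 1 = 0 ∨ PySem.Int.band (a >>> i) 1 = 1 := by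
  rw [PySem.Int.band_one]
  have h : PySem.Int.mod (a >>> i) 2 = (a >>> i) % 2 := by simp [pysem]
  rw [h]; omega

theorem pv_two_mul_lor_one (m : Nat) : (2 * m) ||| 1 = 2 * m + 1 := by
  apply Nat.eq_of_testBit_eq
  intro i
  cases i with
  | zero => simp
  | succ j =>
    rw [Nat.testBit_lor]
    simp [Nat.testBit_succ]
    congr 1
    omega

-- OR of an even left-shifted value with a single bit is addition
theorem pv_bor_double (x b : Int) (hx : 0 ≤ x) (hb : b = 0 ∨ b = 1) :
    PySem.Int.bor (x <<< (1 : Nat)) b = 2 * x + b := by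
  rcases hb with hb | hb
  · subst hb; simp [PySem.Int.bor_zero, Int.shiftLeft_eq]; ring
  · subst hb
    have hx2 : (0:Int) ≤ x <<< (1 : Nat) := by rw [Int.shiftLeft_eq]; positivity
    rw [PySem.Int.bor_of_nonneg hx2 (by norm_num)]
    have h1 : (x <<< (1 : Nat)).toNat = 2 * x.toNat := by
      rw [Int.shiftLeft_eq]; omega
    rw [h1]
    simp [pv_two_mul_lor_one]
    omega

-- the sum of mirrored-bit terms is nonnegative
theorem pv_sum_nonneg (a : Int) (k : Nat) :
    0 ≤ ((List.range k).map
      (fun (i : Nat) => (PySem.Int.band (a >>> i) 1) <<< (k - 1 - i))).sum := by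
  apply List.sum_nonneg
  intro x hx
  simp only [List.mem_map] at hx
  obtain ⟨i, _, rfl⟩ := hx
  rw [Int.shiftLeft_eq]
  rcases pv_bit01 a i with h | h <;> rw [h] <;> positivity

-- loop invariant: A's shift-accumulate fold equals acc·2^k plus the mirrored-bit sum
theorem pv_loop_eq (a : Int) : ∀ (k : Nat) (acc : Int), 0 ≤ acc →
    (List.range k).foldl
      (fun (ac : Int) (i : Nat) => PySem.Int.bor (ac <<< (1 : Nat)) (PySem.Int.band (a >>> i) 1)) acc
    = acc * 2 ^ k + ((List.range k).map
        (fun (i : Nat) => (PySem.Int.band (a >>> i) 1) <<< (k - 1 - i))).sum := by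
  intro k
  induction k with
  | zero => intro acc _; simp
  | succ k ih =>
    intro acc hacc
    rw [List.range_succ, List.foldl_append, ih acc hacc]
    have hF : 0 ≤ acc * 2 ^ k + ((List.range k).map
        (fun (i : Nat) => (PySem.Int.band (a >>> i) 1) <<< (k - 1 - i))).sum := by
      have := pv_sum_nonneg a k
      positivity
    simp only [List.foldl_cons, List.foldl_nil]
    rw [pv_bor_double _ _ hF (pv_bit01 a k)]
    rw [List.map_append, List.sum_append]
    simp only [List.map_cons, List.map_nil, List.sum_cons, List.sum_nil]
    have hterm : (List.range k).map
        (fun (i : Nat) => (PySem.Int.band (a >>> i) 1) <<< (k + 1 - 1 - i))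
        = (List.range k).map
        (fun (i : Nat) => 2 * ((PySem.Int.band (a >>> i) 1) <<< (k - 1 - i))) := by
      apply List.map_congr_left
      intro i hi
      rw [List.mem_range] at hi
      rw [Int.shiftLeft_eq, Int.shiftLeft_eq]
      have : k + 1 - 1 - i = (k - 1 - i) + 1 := by omega
      rw [this, pow_succ]
      ring
    rw [hterm, List.sum_map_mul_left]
    have : k + 1 - 1 - k = 0 := by omega
    rw [this]
    rw [Int.shiftLeft_eq]
    ring

-- ---- bit bookkeeping ----

theorem pv_band1_eq_bit (a : Int) (i : Nat) :
    PySem.Int.band (a >>> i) 1 = pvBit a i := by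
  rw [PySem.Int.band_one, PySem.Int.mod_eq_emod_of_pos (by norm_num),
    Int.shiftRight_eq_div_pow]
  unfold pvBit
  norm_num

theorem pv_nat_and_mask (x n : Nat) : x &&& (2 ^ n - 1) = x % 2 ^ n :=
  Nat.and_two_pow_sub_one_eq_mod x n

-- Python's a & (2^21 - 1) is a mod 2^21, also for negative a
theorem pv_band_mask21 (a : Int) : PySem.Int.band a 2097151 = a % 2097152 := by
  unfold PySem.Int.band
  have m : (2097151 : Int).toNat = 2097151 := rfl
  split_ifs with h1 h2 h3 <;> try omega
  · rw [m, show (2097151 : Nat) = 2 ^ 21 - 1 from rfl, pv_nat_and_mask]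
    omega
  · rw [m, Nat.and_comm, show (2097151 : Nat) = 2 ^ 21 - 1 from rfl, pv_nat_and_mask]
    omega

theorem pv_band_mask7 (a : Int) : PySem.Int.band a 127 = a % 128 := by
  unfold PySem.Int.band
  have m : (127 : Int).toNat = 127 := rfl
  split_ifs with h1 h2 h3 <;> try omega
  · rw [m, show (127 : Nat) = 2 ^ 7 - 1 from rfl, pv_nat_and_mask]
    omega
  · rw [m, Nat.and_comm, show (127 : Nat) = 2 ^ 7 - 1 from rfl, pv_nat_and_mask]
    omega

-- low bits are unchanged by reducing mod a higher power of two
theorem pv_bit_mod (a : Int) (n i : Nat) (h : i < n) :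
    pvBit (a % 2 ^ n) i = pvBit a i := by
  unfold pvBit
  have hq : a % 2 ^ n = a - 2 ^ n * (a / 2 ^ n) := Int.emod_def a (2 ^ n)
  have hpow : (2 : Int) ^ n = 2 ^ (n - i) * 2 ^ i := by
    rw [← pow_add]; congr 1; omega
  have hdiv : (a % 2 ^ n) / 2 ^ i = a / 2 ^ i + (-(2 ^ (n - i) * (a / 2 ^ n))) := by
    have : a % 2 ^ n = a + (-(2 ^ (n - i) * (a / 2 ^ n))) * 2 ^ i := by
      rw [hq, hpow]; ring
    rw [this, Int.add_mul_ediv_right _ _ (by positivity)]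
  rw [hdiv]
  have h2 : a / 2 ^ i + -(2 ^ (n - i) * (a / 2 ^ n))
      = a / 2 ^ i + 2 * (-(2 ^ (n - i - 1) * (a / 2 ^ n))) := by
    have hni : (2 : Int) ^ (n - i) = 2 * 2 ^ (n - i - 1) := by
      rw [← pow_succ']; congr 1; omega
    rw [hni]; ring
  rw [h2, Int.add_mul_emod_self_left]

-- bit (k+i) of a is bit i of a >> k
theorem pv_bit_shift (a : Int) (k i : Nat) : pvBit a (k + i) = pvBit (a / 2 ^ k) i := by
  unfold pvBit
  rw [Int.ediv_ediv_of_nonneg (show (0:Int) ≤ 2 ^ k by positivity), ← pow_add]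

-- ---- the table ----

set_option maxRecDepth 10000 in
theorem pv_table_all : ((List.range 128).all fun j =>
    (PySem.List.pyGet? REV7 ((j : Nat) : Int)).getD 0 == pvRevSum7 (j : Int)) = true := by
  decide

theorem pv_table (x : Int) (h0 : 0 ≤ x) (h1 : x < 128) :
    (PySem.List.pyGet? REV7 x).getD 0 = pvRevSum7 x := by
  have hx : x = ((x.toNat : Nat) : Int) := (Int.toNat_of_nonneg h0).symm
  have hn : x.toNat < 128 := by omega
  rw [hx]
  exact eq_of_beq (List.all_eq_true.mp pv_table_all _ (List.mem_range.mpr hn))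

-- ---- splitting the 21-bit mirrored sum into three 7-bit chunks ----

theorem pv_chunk (r : Int) (k : Nat) :
    ((List.range 7).map (fun i => pvBit r (k + i) * 2 ^ (6 - i))).sum
      = pvRevSum7 ((r / 2 ^ k) % 128) := by
  unfold pvRevSum7
  congr 1
  apply List.map_congr_left
  intro i hi
  rw [List.mem_range] at hi
  have h128 : ((128 : Int)) = 2 ^ (7 : Nat) := by norm_num
  rw [h128, pv_bit_mod _ 7 i hi, ← pv_bit_shift]

theorem pv_split (r : Int) :
    ((List.range 21).map (fun i => pvBit r i * 2 ^ (20 - i))).sum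
      = pvRevSum7 (r % 128) * 2 ^ (14 : Nat)
        + pvRevSum7 ((r / 128) % 128) * 2 ^ (7 : Nat)
        + pvRevSum7 ((r / 16384) % 128) := by
  have h21 : List.range 21
      = List.range 7 ++ (List.range 7).map (fun i => 7 + i)
          ++ (List.range 7).map (fun i => 14 + i) := by decide
  rw [h21, List.map_append, List.map_append, List.sum_append, List.sum_append,
    List.map_map, List.map_map]
  have c0 : ((List.range 7).map (fun i => pvBit r i * 2 ^ (20 - i))).sum
      = pvRevSum7 (r % 128) * 2 ^ (14 : Nat) := by
    have : ((List.range 7).map (fun i => pvBit r i * 2 ^ (20 - i))).sum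
        = ((List.range 7).map (fun i => pvBit r (0 + i) * 2 ^ (6 - i) * 2 ^ (14 : Nat))).sum := by
      congr 1
      apply List.map_congr_left
      intro i hi
      rw [List.mem_range] at hi
      have h1 : 20 - i = (6 - i) + 14 := by omega
      rw [h1, pow_add, Nat.zero_add]
      ring
    rw [this, List.sum_map_mul_right, pv_chunk r 0]
    all_goals norm_num
  have c1 : ((List.range 7).map ((fun i => pvBit r i * 2 ^ (20 - i)) ∘ fun i => 7 + i)).sum
      = pvRevSum7 ((r / 128) % 128) * 2 ^ (7 : Nat) := by
    have : ((List.range 7).map ((fun i => pvBit r i * 2 ^ (20 - i)) ∘ fun i => 7 + i)).sum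
        = ((List.range 7).map (fun i => pvBit r (7 + i) * 2 ^ (6 - i) * 2 ^ (7 : Nat))).sum := by
      congr 1
      apply List.map_congr_left
      intro i hi
      rw [List.mem_range] at hi
      simp only [Function.comp_apply]
      have h1 : 20 - (7 + i) = (6 - i) + 7 := by omega
      rw [h1, pow_add]
      ring
    rw [this, List.sum_map_mul_right, pv_chunk r 7]
    all_goals norm_num
  have c2 : ((List.range 7).map ((fun i => pvBit r i * 2 ^ (20 - i)) ∘ fun i => 14 + i)).sum
      = pvRevSum7 ((r / 16384) % 128) := by
    have : ((List.range 7).map ((fun i => pvBit r i * 2 ^ (20 - i)) ∘ fun i => 14 + i)).sum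
        = ((List.range 7).map (fun i => pvBit r (14 + i) * 2 ^ (6 - i))).sum := by
      congr 1
    rw [this, pv_chunk r 14]
    all_goals norm_num
  rw [c0, c1, c2]

-- ===== VERDICT (by name: the statement is the Claim_ definition above) =====
set_option maxRecDepth 10000 in
theorem convert_nikobus_address_spec : Claim_equal_convert_nikobus_address := by
  intro s _
  unfold Spec_convert_nikobus_address
  cases h : PySem.Int.ofStrBase? s 16 with
  | none => simp [convert_nikobus_address, convert_nikobus_address_alt, h]
  | some a =>
    simp only [convert_nikobus_address, convert_nikobus_address_alt, h]
    congr 2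
    -- the A-side fold over pyRange becomes a fold over List.range
    have hrange : PySem.List.pyRange 0 21 1 = (List.range 21).map Int.ofNat := by decide
    rw [hrange, List.foldl_map]
    simp only [Int.ofNat_eq_natCast, Int.toNat_natCast, Int.shiftRight_natCast_right]
    rw [pv_loop_eq a 21 0 le_rfl]
    simp only [zero_mul, zero_add]
    -- rewrite the mirrored-bit sum into pvBit form
    have hsumA : ((List.range 21).map
        (fun (i : Nat) => (PySem.Int.band (a >>> i) 1) <<< (21 - 1 - i))).sum
        = ((List.range 21).map (fun i => pvBit a i * 2 ^ (20 - i))).sum := by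
      congr 1
      apply List.map_congr_left
      intro i hi
      rw [List.mem_range] at hi
      rw [pv_band1_eq_bit, Int.shiftLeft_eq, show 21 - 1 - i = 20 - i from by omega]
    rw [hsumA]
    -- bits of a below 21 are the bits of low = a & 0x1FFFFF
    set r : Int := a % 2097152 with hr
    have hlow : PySem.Int.band a 2097151 = r := pv_band_mask21 a
    have hrb : 0 ≤ r ∧ r < 2097152 := by constructor <;> omega
    have hsumr : ((List.range 21).map (fun i => pvBit a i * 2 ^ (20 - i))).sum
        = ((List.range 21).map (fun i => pvBit r i * 2 ^ (20 - i))).sum := by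
      congr 1
      apply List.map_congr_left
      intro i hi
      rw [List.mem_range] at hi
      have h2 : ((2097152 : Int)) = 2 ^ (21 : Nat) := by norm_num
      rw [hr, h2, pv_bit_mod a 21 i hi]
    rw [hsumr, pv_split r]
    -- the B side: three table lookups
    rw [hlow, pv_band_mask7 r]
    have hsh7 : r >>> (7 : Nat) = r / 128 := by
      rw [Int.shiftRight_eq_div_pow]; norm_num
    have hsh14 : r >>> (14 : Nat) = r / 16384 := by
      rw [Int.shiftRight_eq_div_pow]; norm_num
    rw [hsh7, hsh14, pv_band_mask7 (r / 128)]
    have ht0 : (PySem.List.pyGet? REV7 (r % 128)).getD 0 = pvRevSum7 (r % 128) :=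
      pv_table _ (by omega) (by omega)
    have ht1 : (PySem.List.pyGet? REV7 (r / 128 % 128)).getD 0 = pvRevSum7 (r / 128 % 128) :=
      pv_table _ (by omega) (by omega)
    have ht2 : (PySem.List.pyGet? REV7 (r / 16384)).getD 0 = pvRevSum7 (r / 16384) :=
      pv_table _ (by omega) (by omega)
    have hm2 : (r / 16384) % 128 = r / 16384 := by omega
    rw [ht0, ht1, ht2, hm2]
    simp only [Int.shiftLeft_eq]
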